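-- pv_equiv track=rewrite | github.com/mmdoogie/everybody-codes | ec_2025/ec_2025_16.py | spell_for_wall
-- ===== SOURCE A (Python) =====
-- def spell_for_wall(wall):
--     spell = []
--     wall_len = len(wall)
--     for i in range(1, 1 + wall_len):
--         if wall[i - 1]:
--             for j in range(i - 1, wall_len, i):
--                 wall[j] -= 1
--             spell += [i]
--
--     return spell
-- ===== SOURCE B (Python) =====
-- def spell_for_wall(wall):
--     # Gather formulation: each i pulls one point from every previously recorded
--     # divisor of i (found by trial division up to sqrt(i)), instead of each
--     # recorded i scattering -1 over its multiples.
--     # Mutates wall in place exactly like the original (final wall values match).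
--     spell = []
--     recorded = [False] * (len(wall) + 1)
--     for i in range(1, len(wall) + 1):
--         pulled = 0
--         d = 1
--         while d * d <= i:
--             if i % d == 0:
--                 if d < i and recorded[d]:
--                     pulled += 1
--                 e = i // d
--                 if e != d and e < i and recorded[e]:
--                     pulled += 1
--             d += 1
--         cur = wall[i - 1] - pulled
--         if cur:
--             spell.append(i)
--             recorded[i] = True
--             wall[i - 1] = cur - 1
--         else:
--             wall[i - 1] = cur
--     return spell
-- ===== Notes on version B (the rewrite author's own statement) =====
-- stated objective: alternative
-- what changed: Replaced the scatter sieve (each recorded i decrements wall at all its multiples in place) by a gather pass (each i counts its previously recorded divisors by trial division up to sqrt(i) against a recorded-flags list and subtracts that count from its original wall entry, writing each wall cell exactly once).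
import Mathlib
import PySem

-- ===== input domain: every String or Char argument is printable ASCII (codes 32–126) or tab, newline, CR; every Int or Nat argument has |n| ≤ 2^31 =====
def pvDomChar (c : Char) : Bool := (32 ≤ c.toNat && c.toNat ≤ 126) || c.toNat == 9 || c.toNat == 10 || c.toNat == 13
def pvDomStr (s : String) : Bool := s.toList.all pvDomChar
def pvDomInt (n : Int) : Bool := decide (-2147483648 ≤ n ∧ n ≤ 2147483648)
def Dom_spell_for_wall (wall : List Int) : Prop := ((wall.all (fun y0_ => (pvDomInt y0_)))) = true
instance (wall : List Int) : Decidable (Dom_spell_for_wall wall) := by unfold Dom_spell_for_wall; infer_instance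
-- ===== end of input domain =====

-- B replaces A's scatter-to-multiples sieve by a gather pass that counts each i's
-- previously recorded divisors by trial division up to sqrt(i) (objective: alternative
-- decomposition; both Pythons also mutate `wall` in place identically — the theorems
-- here are about the RETURN value, the spell list).

-- ===== PORT A =====
-- inner loop `for j in range(i-1, wall_len, i): wall[j] -= 1`
-- (the `0 < step` test only makes the recursion total; A always calls it with step = i ≥ 1)
def decLoop (n step : Nat) (w : List Int) (j : Nat) : List Int :=
  if _h : j < n ∧ 0 < step then decLoop n step (w.set j (w.getD j 0 - 1)) (j + step) else w
  termination_by n - j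
  decreasing_by omega

def spell_for_wall (wall : List Int) : List Int :=
  let n := wall.length
  ((List.range' 1 n).foldl (fun (st : List Int × List Int) i =>
      if st.1.getD (i - 1) 0 ≠ 0 then (decLoop n i st.1 (i - 1), st.2 ++ [(i : Int)])
      else st) (wall, [])).2

-- ===== PORT B =====
-- inner loop `while d*d <= i: ...` counting recorded divisors of i by trial division
def pull (recd : List Bool) (i : Nat) (d : Nat) : Nat :=
  if _h : d * d ≤ i then
    (if i % d = 0 then
       (if d < i ∧ recd.getD d false then 1 else 0) +
       (if i / d ≠ d ∧ i / d < i ∧ recd.getD (i / d) false then 1 else 0)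
     else 0) + pull recd i (d + 1)
  else 0
  termination_by i + 1 - d
  decreasing_by
    rcases Nat.eq_zero_or_pos d with h0 | h0
    · omega
    · have : d ≤ d * d := Nat.le_mul_of_pos_left d h0
      omega

def spell_for_wall_alt (wall : List Int) : List Int :=
  let n := wall.length
  ((List.range' 1 n).foldl (fun (st : List Int × List Bool × List Int) i =>
      let cur := st.1.getD (i - 1) 0 - (pull st.2.1 i 1 : Int)
      if cur ≠ 0 then (st.1.set (i - 1) (cur - 1), st.2.1.set i true, st.2.2 ++ [(i : Int)])
      else (st.1.set (i - 1) cur, st.2.1, st.2.2)) (wall, List.replicate (n + 1) false, [])).2.2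

-- ===== PRECONDITION & SPEC =====
def Spec_spell_for_wall (wall : List Int) (out : List Int) : Prop := out = spell_for_wall_alt wall
instance (wall : List Int) (out : List Int) : Decidable (Spec_spell_for_wall wall out) := by unfold Spec_spell_for_wall; infer_instance

-- ===== CLAIM (what is proved, stated in full; the proofs are below) =====
def Claim_equal_spell_for_wall : Prop := ∀ (wall : List Int), Dom_spell_for_wall wall → Spec_spell_for_wall wall (spell_for_wall wall)

-- ===== LEMMAS AND PROOFS =====

-- fold bodies of the two ports, named so the lemmas can speak about them
def fA (n : Nat) (st : List Int × List Int) (i : Nat) : List Int × List Int :=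
  if st.1.getD (i - 1) 0 ≠ 0 then (decLoop n i st.1 (i - 1), st.2 ++ [(i : Int)]) else st

def fB (n : Nat) (st : List Int × List Bool × List Int) (i : Nat) :
    List Int × List Bool × List Int :=
  let cur := st.1.getD (i - 1) 0 - (pull st.2.1 i 1 : Int)
  if cur ≠ 0 then (st.1.set (i - 1) (cur - 1), st.2.1.set i true, st.2.2 ++ [(i : Int)])
  else (st.1.set (i - 1) cur, st.2.1, st.2.2)

theorem spell_for_wall_eq_fold (wall : List Int) :
    spell_for_wall wall = ((List.range' 1 wall.length).foldl (fA wall.length) (wall, [])).2 := rfl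

theorem spell_for_wall_alt_eq_fold (wall : List Int) :
    spell_for_wall_alt wall = ((List.range' 1 wall.length).foldl (fB wall.length)
      (wall, List.replicate (wall.length + 1) false, [])).2.2 := rfl

theorem getD_set_ne (l : List Int) (a b : Nat) (v : Int) (h : a ≠ b) :
    (l.set a v).getD b 0 = l.getD b 0 := by
  simp [List.getD, List.getElem?_set_ne h]

theorem getD_set_self (l : List Int) (a : Nat) (v : Int) (h : a < l.length) :
    (l.set a v).getD a 0 = v := by
  simp [List.getD, h]

theorem countP_point (N a : Nat) (p : Nat → Bool) (h : ∀ x, p x = true → x = a) :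
    (List.range N).countP p = if a < N ∧ p a = true then 1 else 0 := by
  induction N with
  | zero => simp
  | succ N ih =>
    rw [List.range_succ, List.countP_append]
    by_cases hN : p N = true
    · have haN := h N hN
      subst haN
      rw [ih]
      simp only [List.countP_cons, List.countP_nil, hN]
      have : ¬ (N < N) := by omega
      simp [this, hN]
    · simp only [List.countP_cons, List.countP_nil, hN]
      rw [ih]
      by_cases haN : a = N
      · subst haN; simp [hN]
      · have : (a < N + 1) ↔ (a < N) := by omega
        simp [this]

theorem countP_split2 {α : Type} (l : List α) (p q : α → Bool) (h : ∀ a, q a = true → p a = true) :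
    l.countP p = l.countP q + l.countP (fun x => p x && !q x) := by
  induction l with
  | nil => simp
  | cons a l ih =>
    by_cases hq : q a = true
    · simp [List.countP_cons, hq, h a hq, ih]; omega
    · by_cases hp : p a = true <;>
        simp [List.countP_cons, hq, hp, ih] <;> omega

theorem countP_disj {α : Type} (l : List α) (p q : α → Bool)
    (h : ∀ a, ¬(p a = true ∧ q a = true)) :
    l.countP (fun x => p x || q x) = l.countP p + l.countP q := by
  induction l with
  | nil => simp
  | cons a l ih =>
    by_cases hp : p a = true
    · have hq : ¬ q a = true := fun hq => h a ⟨hp, hq⟩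
      simp [List.countP_cons, hp, hq, ih]; omega
    · by_cases hq : q a = true <;> simp [List.countP_cons, hp, hq, ih] <;> omega


theorem hpt (recd : List Bool) (i d : Nat) (hi : 1 ≤ i) (h : d * d ≤ i) (hd0 : 0 < d)
    (hdvd : d ∣ i) (hddle : d ≤ i / d) : ∀ x ∈ List.range i,
        ((decide (x ∣ i) && recd.getD x false && decide (d ≤ x) && decide (d ≤ i / x)) &&
         !(decide (x ∣ i) && recd.getD x false && decide (d + 1 ≤ x) && decide (d + 1 ≤ i / x))) =
        ((decide (x = d) && (decide (d < i) && recd.getD d false)) ||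
         (decide (x = i / d) && (decide (i / d ≠ d) && decide (i / d < i) && recd.getD (i / d) false))) := by
  intro x hx
  simp only [List.mem_range] at hx
  by_cases hxd : x ∣ i
  · have hx1 : 1 ≤ x := Nat.pos_of_dvd_of_pos hxd (by omega)
    have hco : x * (i / x) = i := Nat.mul_div_cancel' hxd
    by_cases hxe : x = d
    · subst hxe
      have hnd1 : ¬ (x + 1 ≤ x) := by omega
      by_cases heq : x = i / x
      · simp [hxd, hx, hddle, hnd1, heq.symm]
      · have hne' : ¬ (i / x = x) := fun e => heq e.symm
        simp [hxd, hx, hddle, hnd1, hne', heq]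
    · by_cases hxe2 : x = i / d
      · have e2 : i / d = x := hxe2.symm
        have hixd : i / x = d := by
          have hmul : x * d = i := by rw [hxe2]; exact Nat.div_mul_cancel hdvd
          rw [← hmul, Nat.mul_div_cancel_left d hx1]
        have hdx : d ≤ x := by rw [hxe2]; exact hddle
        have hnd : ¬ (d + 1 ≤ i / x) := by omega
        have hne : x ≠ d := hxe
        rw [e2]
        simp [hxd, hx, hixd, hdx, hnd, hne, fun e => hne (by omega : x = d)]
      · -- x is a divisor distinct from d and i/d: min(x, i/x) = d is impossible
        have hkey : i / x = d → False := fun e => hxe2 (by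
          have hmul : x * d = i := by rw [← e]; exact hco
          have : i / d = x := by rw [← hmul, Nat.mul_div_cancel x hd0]
          omega)
        by_cases hrx : recd.getD x false
        · simp only [hxd, hrx, decide_eq_true_eq, Bool.and_eq_true, decide_true,
            Bool.true_and, Bool.and_true]
          simp [hxe, hxe2]
          intro h1 h2
          have hnd : i / x ≠ d := fun e => hkey e
          constructor <;> omega
        · simp [hxd, hrx, hxe, hxe2]
          intro hr
          exact absurd hr hrx
  · have hx_ne_d : x ≠ d := fun e => hxd (e ▸ hdvd)
    have hx_ne_id : x ≠ i / d := fun e => hxd (e ▸ Nat.div_dvd_of_dvd hdvd)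
    simp [hxd, hx_ne_d, hx_ne_id]




theorem hstep (recd : List Bool) (i d : Nat) (hi : 1 ≤ i) (h : d * d ≤ i) (hd0 : 0 < d) :
    (List.range i).countP (fun x =>
        (decide (x ∣ i) && recd.getD x false && decide (d ≤ x) && decide (d ≤ i / x)) &&
        !(decide (x ∣ i) && recd.getD x false && decide (d + 1 ≤ x) && decide (d + 1 ≤ i / x))) =
        (if i % d = 0 then
          (if d < i ∧ recd.getD d false then 1 else 0) +
          (if i / d ≠ d ∧ i / d < i ∧ recd.getD (i / d) false then 1 else 0)
        else 0) := by
  by_cases hdd : i % d = 0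
  · have hdvd : d ∣ i := Nat.dvd_of_mod_eq_zero hdd
    have hddle : d ≤ i / d := (Nat.le_div_iff_mul_le hd0).mpr (by omega)
    rw [List.countP_congr (fun x hx => by rw [hpt recd i d hi h hd0 hdvd hddle x hx])]
    rw [countP_disj _ _ _ (by
      intro a hab
      simp only [Bool.and_eq_true, decide_eq_true_eq] at hab
      obtain ⟨⟨ha1, _⟩, ⟨ha2, ⟨hne, _⟩, _⟩⟩ := hab
      exact hne (by omega))]
    rw [countP_point i d _ (by intro x hx; simp at hx; exact hx.1),
        countP_point i (i / d) _ (by intro x hx; simp at hx; exact hx.1)]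
    rw [if_pos hdd]
    by_cases h1 : d < i ∧ recd.getD d false = true
    · rw [if_pos ⟨h1.1, by simpa [List.getD] using h1⟩, if_pos h1]
      by_cases h2 : i / d ≠ d ∧ i / d < i ∧ recd.getD (i / d) false = true
      · rw [if_pos ⟨h2.2.1, by simpa [List.getD, and_assoc] using h2⟩, if_pos h2]
      · rw [if_neg (by
          rintro ⟨hlt, hb⟩
          simp only [Bool.and_eq_true, decide_eq_true_eq] at hb
          exact h2 ⟨hb.2.1.1, hb.2.1.2, hb.2.2⟩), if_neg h2]
    · rw [if_neg (by
        rintro ⟨hlt, hb⟩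
        simp only [Bool.and_eq_true, decide_eq_true_eq] at hb
        exact h1 ⟨hb.2.1, hb.2.2⟩), if_neg h1]
      by_cases h2 : i / d ≠ d ∧ i / d < i ∧ recd.getD (i / d) false = true
      · rw [if_pos ⟨h2.2.1, by simpa [List.getD, and_assoc] using h2⟩, if_pos h2]
      · rw [if_neg (by
          rintro ⟨hlt, hb⟩
          simp only [Bool.and_eq_true, decide_eq_true_eq] at hb
          exact h2 ⟨hb.2.1.1, hb.2.1.2, hb.2.2⟩), if_neg h2]
  · rw [if_neg hdd, List.countP_eq_zero]
    intro x hx hpx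
    simp only [List.mem_range] at hx
    simp only [Bool.and_eq_true, decide_eq_true_eq] at hpx
    obtain ⟨⟨⟨⟨hxd, hrx⟩, hd1⟩, hd2⟩, hneg⟩ := hpx
    have hx1 : 1 ≤ x := Nat.pos_of_dvd_of_pos hxd (by omega)
    have hco : x * (i / x) = i := Nat.mul_div_cancel' hxd
    have hrx' : recd[x]?.getD false = true := by simpa [List.getD] using hrx
    have hor : ¬(d + 1 ≤ x) ∨ ¬(d + 1 ≤ i / x) := by
      rcases Nat.lt_or_ge x (d + 1) with hc | hc
      · left; omega
      · rcases Nat.lt_or_ge (i / x) (d + 1) with hc2 | hc2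
        · right; omega
        · exfalso; simp [hxd, hrx', hc, hc2] at hneg
    have hddvd : d ∣ i := by
      rcases hor with h' | h'
      · have : x = d := by omega
        exact this ▸ hxd
      · have he : i / x = d := by omega
        have : x * d = i := by rw [← he]; exact hco
        exact ⟨x, by rw [← this]; ring⟩
    exact hdd (Nat.mod_eq_zero_of_dvd hddvd)

theorem pull_eq_countP (recd : List Bool) (i : Nat) (hi : 1 ≤ i) : ∀ d, 0 < d →
    pull recd i d = (List.range i).countP
      (fun m => decide (m ∣ i) && recd.getD m false && decide (d ≤ m) && decide (d ≤ i / m)) := by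
  intro d hd0
  fun_induction pull recd i d with
  | case1 d h ih =>
    rw [ih (by omega)]
    rw [countP_split2 (List.range i)
      (fun m => decide (m ∣ i) && recd.getD m false && decide (d ≤ m) && decide (d ≤ i / m))
      (fun m => decide (m ∣ i) && recd.getD m false && decide (d + 1 ≤ m) && decide (d + 1 ≤ i / m))
      (by intro a ha; simp only [Bool.and_eq_true, decide_eq_true_eq] at *
          exact ⟨⟨⟨ha.1.1.1, ha.1.1.2⟩, by omega⟩, by omega⟩)]
    rw [hstep recd i d hi h hd0]
    omega
  | case2 d h =>
    symm
    rw [List.countP_eq_zero]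
    intro x hx hpx
    simp only [List.mem_range] at hx
    simp only [Bool.and_eq_true, decide_eq_true_eq] at hpx
    obtain ⟨⟨⟨hdvd, _⟩, hdx⟩, hdix⟩ := hpx
    have hco : x * (i / x) = i := Nat.mul_div_cancel' hdvd
    have : d * d ≤ x * (i / x) := Nat.mul_le_mul hdx hdix
    omega

def cnt (recd : List Bool) (t : Nat) : Nat :=
  (List.range (t + 1)).countP (fun m => decide (m ∣ t) && recd.getD m false)

theorem getDb_set (l : List Bool) (a b : Nat) (v : Bool) (ha : a < l.length) :
    (l.set a v).getD b false = if b = a then v else l.getD b false := by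
  by_cases h : b = a
  · subst h; simp [List.getD, ha]
  · rw [if_neg h]; simp [List.getD, List.getElem?_set_ne (fun e => h e.symm)]

theorem cnt_set (recd : List Bool) (a t : Nat) (ha : a < recd.length)
    (hf : recd.getD a false = false) :
    cnt (recd.set a true) t = cnt recd t + (if a ∣ t ∧ a ≤ t then 1 else 0) := by
  unfold cnt
  have hpt : ∀ m, (recd.set a true).getD m false = if m = a then true else recd.getD m false :=
    fun m => getDb_set recd a m true ha
  rw [countP_split2 (List.range (t + 1))
    (fun m => decide (m ∣ t) && (recd.set a true).getD m false)
    (fun m => decide (m ∣ t) && recd.getD m false)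
    (by intro m hm
        simp only [Bool.and_eq_true] at *
        refine ⟨hm.1, ?_⟩
        rw [hpt m]
        split
        · rfl
        · exact hm.2)]
  congr 1
  rw [countP_point (t + 1) a _ (by
    intro x hxp
    by_contra hne
    have hx2 : (recd.set a true).getD x false = recd.getD x false := by
      rw [hpt x, if_neg hne]
    simp only [List.getD] at hx2
    simp only [Bool.and_eq_true, Bool.not_eq_true', Bool.and_eq_false_iff,
      decide_eq_true_eq, decide_eq_false_iff_not, List.getD] at hxp
    rw [hx2] at hxp
    rcases hxp.2 with h' | h'
    · exact h' hxp.1.1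
    · exact absurd hxp.1.2 (by simp [h']))]
  have hpa : (recd.set a true).getD a false = true := by rw [hpt a]; simp
  by_cases hc : a ∣ t ∧ a ≤ t
  · rw [if_pos ⟨by omega, by
      simp only [Bool.and_eq_true, Bool.not_eq_true', Bool.and_eq_false_iff,
        decide_eq_true_eq, decide_eq_false_iff_not, List.getD] at hpa hf ⊢
      exact ⟨⟨hc.1, hpa⟩, Or.inr hf⟩⟩, if_pos hc]
  · rw [if_neg (by
      rintro ⟨hlt, hb⟩
      simp only [Bool.and_eq_true, Bool.not_eq_true', Bool.and_eq_false_iff,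
        decide_eq_true_eq, decide_eq_false_iff_not, List.getD] at hb
      exact hc ⟨hb.1.1, by omega⟩), if_neg hc]

theorem cnt_eq_pull (recd : List Bool) (i : Nat) (hi : 1 ≤ i)
    (hf : recd.getD i false = false) :
    cnt recd i = pull recd i 1 := by
  unfold cnt
  rw [List.range_succ, List.countP_append]
  have hf' : recd[i]?.getD false = false := by simpa [List.getD] using hf
  have h2 : List.countP (fun m => decide (m ∣ i) && recd.getD m false) [i] = 0 := by
    simp [List.countP_cons, List.getD, hf']
  rw [h2, pull_eq_countP recd i hi 1 (by omega)]
  have hcg : List.countP (fun m => decide (m ∣ i) && recd.getD m false) (List.range i)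
      = List.countP (fun m => decide (m ∣ i) && recd.getD m false &&
          decide (1 ≤ m) && decide (1 ≤ i / m)) (List.range i) := by
    apply List.countP_congr
    intro x hx
    simp only [List.mem_range] at hx
    by_cases hxd : x ∣ i
    · have hx1 : 1 ≤ x := Nat.pos_of_dvd_of_pos hxd (by omega)
      have hx2 : 1 ≤ i / x := (Nat.le_div_iff_mul_le hx1).mpr (by
        have := Nat.le_of_dvd (by omega) hxd
        omega)
      simp [hxd, hx1, hx2]
    · simp [hxd]
  omega


-- cnt of the all-false record is zero
theorem cnt_replicate (n t : Nat) : cnt (List.replicate n false) t = 0 := by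
  unfold cnt
  rw [List.countP_eq_zero]
  intro x _
  have : (List.replicate n false).getD x false = false := by
    simp [List.getD, List.getElem?_replicate]
    split <;> rfl
  simp [List.getD] at this
  simp [this]

theorem decLoop_length (n step : Nat) (w : List Int) (j : Nat) :
    (decLoop n step w j).length = w.length := by
  fun_induction decLoop <;> simp_all

theorem decLoop_getD (n step : Nat) (w : List Int) (j : Nat) (hs : 0 < step) (t : Nat) :
    t < w.length → w.length = n →
    (decLoop n step w j).getD t 0 =
      w.getD t 0 - (if j ≤ t ∧ step ∣ (t - j) then 1 else 0) := by
  fun_induction decLoop n step w j with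
  | case1 w j h ih =>
    intro ht hw
    rw [ih (by simpa using ht) (by simpa using hw)]
    by_cases hj : t = j
    · subst hj
      rw [getD_set_self _ _ _ (by omega)]
      have h1 : ¬ (t + step ≤ t) := by omega
      simp [h1]
    · rw [getD_set_ne _ _ _ _ (fun e => hj e.symm)]
      have heq : (j + step ≤ t ∧ step ∣ t - (j + step)) ↔ (j ≤ t ∧ step ∣ t - j) := by
        constructor
        · rintro ⟨h1, h2⟩
          refine ⟨by omega, ?_⟩
          have e : t - j = (t - (j + step)) + step := by omega
          rw [e]; exact dvd_add h2 dvd_rfl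
        · rintro ⟨h1, h2⟩
          have hlt : j < t := by omega
          have hge : step ≤ t - j := Nat.le_of_dvd (by omega) h2
          refine ⟨by omega, ?_⟩
          have e : t - (j + step) = (t - j) - step := by omega
          rw [e]; exact Nat.dvd_sub h2 dvd_rfl
      rw [if_congr heq rfl rfl]
  | case2 w j h =>
    intro ht hw
    have : ¬ (j ≤ t) := by omega
    simp [this]

theorem dvd_shift (k t : Nat) : (k ≤ t ∧ (1 + k) ∣ (t - k)) ↔ (1 + k) ∣ (t + 1) := by
  constructor
  · rintro ⟨h1, h2⟩
    have e : t + 1 = (t - k) + (1 + k) := by omega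
    rw [e]; exact dvd_add h2 dvd_rfl
  · intro h
    have hge : 1 + k ≤ t + 1 := Nat.le_of_dvd (by omega) h
    refine ⟨by omega, ?_⟩
    have e : t - k = (t + 1) - (1 + k) := by omega
    rw [e]; exact Nat.dvd_sub h dvd_rfl

theorem inv (wall : List Int) (k : Nat) (hk : k ≤ wall.length) :
    ((List.range' 1 k).foldl (fA wall.length) (wall, [])).2 =
      ((List.range' 1 k).foldl (fB wall.length)
        (wall, List.replicate (wall.length + 1) false, [])).2.2 ∧
    ((List.range' 1 k).foldl (fA wall.length) (wall, [])).1.length = wall.length ∧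
    ((List.range' 1 k).foldl (fB wall.length)
        (wall, List.replicate (wall.length + 1) false, [])).1.length = wall.length ∧
    ((List.range' 1 k).foldl (fB wall.length)
        (wall, List.replicate (wall.length + 1) false, [])).2.1.length = wall.length + 1 ∧
    (∀ j, j < wall.length →
      ((List.range' 1 k).foldl (fA wall.length) (wall, [])).1.getD j 0 =
        wall.getD j 0 - (cnt ((List.range' 1 k).foldl (fB wall.length)
          (wall, List.replicate (wall.length + 1) false, [])).2.1 (j+1) : Int)) ∧
    (∀ j, k ≤ j → j < wall.length →
      ((List.range' 1 k).foldl (fB wall.length)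
        (wall, List.replicate (wall.length + 1) false, [])).1.getD j 0 = wall.getD j 0) ∧
    (∀ m, k + 1 ≤ m →
      ((List.range' 1 k).foldl (fB wall.length)
        (wall, List.replicate (wall.length + 1) false, [])).2.1.getD m false = false) := by
  induction k with
  | zero =>
    refine ⟨rfl, rfl, rfl, by simp, ?_, fun j _ _ => rfl, ?_⟩
    · intro j hj
      simp [cnt_replicate]
    · intro m _
      simp [List.getD, List.getElem?_replicate]
      split <;> rfl
  | succ k ih =>
    obtain ⟨h1, h2, h3, h3b, h4, h5, h6⟩ := ih (by omega)
    have hrange : List.range' 1 (k+1) = List.range' 1 k ++ [1+k] := by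
      have := List.range'_concat (s := 1) (n := k) (step := 1); simpa using this
    rw [hrange]
    simp only [List.foldl_append, List.foldl_cons, List.foldl_nil]
    set A := (List.range' 1 k).foldl (fA wall.length) (wall, []) with hA
    set B := (List.range' 1 k).foldl (fB wall.length)
      (wall, List.replicate (wall.length + 1) false, []) with hB
    have hkn : k < wall.length := by omega
    have e1 : 1 + k - 1 = k := by omega
    have e2 : 1 + k = k + 1 := by omega
    have hAk : A.1.getD k 0 = wall.getD k 0 - (cnt B.2.1 (k+1) : Int) := h4 k hkn
    have hBk : B.1.getD k 0 = wall.getD k 0 := h5 k le_rfl hkn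
    have hfk : B.2.1.getD (1+k) false = false := h6 (1+k) (by omega)
    have hpull : (pull B.2.1 (1+k) 1 : Nat) = cnt B.2.1 (k+1) := by
      rw [← cnt_eq_pull B.2.1 (1+k) (by omega) hfk, e2]
    by_cases hc : wall.getD k 0 - (cnt B.2.1 (k+1) : Int) = 0
    · -- both skip (A leaves state, B writes cur = 0 into cell k, record unchanged)
      have hfa : fA wall.length A (1+k) = A := by
        simp only [fA, e1]
        rw [hAk, if_neg (by simpa using hc)]
      have hfb : fB wall.length B (1+k) =
          (B.1.set k (wall.getD k 0 - (cnt B.2.1 (k+1) : Int)), B.2.1, B.2.2) := by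
        simp only [fB, e1]
        rw [hBk, hpull, if_neg (by simpa using hc)]
      rw [hfa, hfb]
      refine ⟨h1, h2, by simpa using h3, h3b, h4, ?_, ?_⟩
      · intro j hj hjn
        have hne : k ≠ j := by omega
        rw [getD_set_ne _ _ _ _ hne]
        exact h5 j (by omega) hjn
      · intro m hm
        exact h6 m (by omega)
    · -- both record 1+k (A decrements all multiples, B flips the record bit)
      have hfa : fA wall.length A (1+k) =
          (decLoop wall.length (1+k) A.1 k, A.2 ++ [((1+k : Nat) : Int)]) := by
        simp only [fA, e1]
        rw [hAk, if_pos (by simpa using hc)]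
      have hfb : fB wall.length B (1+k) =
          (B.1.set k (wall.getD k 0 - (cnt B.2.1 (k+1) : Int) - 1),
           B.2.1.set (1+k) true, B.2.2 ++ [((1+k : Nat) : Int)]) := by
        simp only [fB, e1]
        rw [hBk, hpull, if_pos (by simpa using hc)]
      rw [hfa, hfb]
      have hset : ∀ t, cnt (B.2.1.set (1+k) true) t =
          cnt B.2.1 t + (if (1+k) ∣ t ∧ (1+k) ≤ t then 1 else 0) :=
        fun t => cnt_set B.2.1 (1+k) t (by omega) hfk
      refine ⟨by rw [h1], ?_, by simpa using h3, by simpa using h3b, ?_, ?_, ?_⟩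
      · rw [decLoop_length]; exact h2
      · intro j hjn
        rw [decLoop_getD wall.length (1+k) A.1 k (by omega) j (by omega) h2]
        rw [h4 j hjn, hset (j+1)]
        have hiff : (k ≤ j ∧ (1+k) ∣ (j - k)) ↔ ((1+k) ∣ (j+1) ∧ (1+k) ≤ (j+1)) := by
          rw [dvd_shift k j]
          constructor
          · intro h'; exact ⟨h', Nat.le_of_dvd (by omega) h'⟩
          · intro h'; exact h'.1
        rw [if_congr hiff rfl rfl]
        push_cast
        split <;> ring
      · intro j hj hjn
        have hne : k ≠ j := by omega
        rw [getD_set_ne _ _ _ _ hne]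
        exact h5 j (by omega) hjn
      · intro m hm
        rw [getDb_set B.2.1 (1+k) m true (by omega)]
        rw [if_neg (by omega)]
        exact h6 m (by omega)

-- ===== VERDICT (by name: the statement is the Claim_ definition above) =====
theorem spell_for_wall_spec : Claim_equal_spell_for_wall := by
  intro wall _
  unfold Spec_spell_for_wall
  rw [spell_for_wall_eq_fold, spell_for_wall_alt_eq_fold]
  exact (inv wall wall.length le_rfl).1
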